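-- pv_equiv track=rewrite | github.com/sushil-sagar05/Ai-Math-Tutor-Agent | server/agents/hitl_math_agent.py | _extract_topic_from_question
-- ===== SOURCE A (Python) =====
-- def _extract_topic_from_question(question: str) -> str:
--     """Extract mathematical topic from question"""
--     question_lower = question.lower()
--
--     if "derivative" in question_lower or "differentiat" in question_lower:
--         return "derivatives"
--     elif "integral" in question_lower or "integrat" in question_lower:
--         return "integration"
--     elif any(trig in question_lower for trig in ["sin", "cos", "tan"]):
--         return "trigonometric functions"
--     elif "equation" in question_lower:
--         return "solving equations"
--     elif "graph" in question_lower: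
--         return "graphing"
--     else:
--         return "this mathematical concept"
-- ===== SOURCE B (Python) =====
-- _KEYWORDS = [
--     ("derivative", 0), ("differentiat", 0),
--     ("integral", 1), ("integrat", 1),
--     ("sin", 2), ("cos", 2), ("tan", 2),
--     ("equation", 3), ("graph", 4),
-- ]
-- _TOPICS = ["derivatives", "integration", "trigonometric functions",
--            "solving equations", "graphing"]
--
--
-- def _extract_topic_from_question(question: str) -> str:
--     """Extract mathematical topic: single sweep over the text keeping the
--     best (lowest) rank of any keyword that starts at each position."""
--     q = question.lower()
--     best = len(_TOPICS)
--     for i in range(len(q)):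
--         for kw, rank in _KEYWORDS:
--             if rank < best and q.startswith(kw, i):
--                 best = rank
--     return _TOPICS[best] if best < len(_TOPICS) else "this mathematical concept"
-- ===== Notes on version B (the rewrite author's own statement) =====
-- stated objective: alternative
-- what changed: Replaced the if/elif chain of independent substring searches by a single left-to-right sweep over the text that, at each position, checks which keywords start there and keeps the minimum rank (priority) seen, then maps the final rank to its topic.
import Mathlib
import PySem

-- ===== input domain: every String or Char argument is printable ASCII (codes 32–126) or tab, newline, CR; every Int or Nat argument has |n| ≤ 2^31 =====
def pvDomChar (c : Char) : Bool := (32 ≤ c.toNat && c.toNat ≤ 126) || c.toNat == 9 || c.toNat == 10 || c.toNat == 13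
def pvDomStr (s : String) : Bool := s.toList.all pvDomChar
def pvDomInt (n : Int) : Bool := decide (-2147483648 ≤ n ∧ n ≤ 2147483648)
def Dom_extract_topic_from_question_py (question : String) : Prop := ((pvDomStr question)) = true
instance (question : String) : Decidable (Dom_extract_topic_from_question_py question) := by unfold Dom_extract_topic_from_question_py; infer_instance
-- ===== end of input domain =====

-- B replaces A's if/elif chain of whole-string substring searches by one left-to-right sweep
-- over the text keeping the minimum rank of any keyword starting at each position (alternative).
-- ===== PORT A =====
def extract_topic_from_question_py (question : String) : String :=
  let question_lower := PySem.Str.lower question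
  if PySem.Str.isIn "derivative" question_lower || PySem.Str.isIn "differentiat" question_lower then
    "derivatives"
  else if PySem.Str.isIn "integral" question_lower || PySem.Str.isIn "integrat" question_lower then
    "integration"
  else if (["sin", "cos", "tan"].any (fun trig => PySem.Str.isIn trig question_lower)) then
    "trigonometric functions"
  else if PySem.Str.isIn "equation" question_lower then
    "solving equations"
  else if PySem.Str.isIn "graph" question_lower then
    "graphing"
  else
    "this mathematical concept"

-- ===== PORT B =====
-- (keyword, rank) pairs; rank indexes pvTopics
def pvKeywords : List (List Char × Nat) :=
  [("derivative".toList, 0), ("differentiat".toList, 0),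
   ("integral".toList, 1), ("integrat".toList, 1),
   ("sin".toList, 2), ("cos".toList, 2), ("tan".toList, 2),
   ("equation".toList, 3), ("graph".toList, 4)]

def pvTopics : List String :=
  ["derivatives", "integration", "trigonometric functions",
   "solving equations", "graphing"]

-- inner loop of Source B: examine all keywords starting at position i (s = q.drop i)
def pvInner (s : List Char) (best : Nat) : Nat :=
  pvKeywords.foldl
    (fun b kr => if kr.2 < b && PySem.Chars.startswith s kr.1 then kr.2 else b) best

def extract_topic_from_question_py_alt (question : String) : String :=
  let q := (PySem.Str.lower question).toList
  let best := (List.range q.length).foldl (fun b i => pvInner (q.drop i) b) pvTopics.length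
  if best < pvTopics.length then pvTopics.getD best "" else "this mathematical concept"

-- ===== PRECONDITION & SPEC =====
def Spec_extract_topic_from_question_py (question : String) (out : String) : Prop := out = extract_topic_from_question_py_alt question
instance (question : String) (out : String) : Decidable (Spec_extract_topic_from_question_py question out) := by unfold Spec_extract_topic_from_question_py; infer_instance

-- ===== CLAIM (what is proved, stated in full; the proofs are below) =====
def Claim_equal_extract_topic_from_question_py : Prop := ∀ (question : String), Dom_extract_topic_from_question_py question → Spec_extract_topic_from_question_py question (extract_topic_from_question_py question)

-- ===== LEMMAS AND PROOFS =====

-- generic form of the inner fold over an arbitrary keyword list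
def pvInnerL (s : List Char) (L : List (List Char × Nat)) (b : Nat) : Nat :=
  L.foldl (fun b kr => if kr.2 < b && PySem.Chars.startswith s kr.1 then kr.2 else b) b

theorem pvInnerL_cons (s : List Char) (kr : List Char × Nat) (L : List (List Char × Nat)) (b : Nat) :
    pvInnerL s (kr :: L) b =
      pvInnerL s L (if kr.2 < b && PySem.Chars.startswith s kr.1 then kr.2 else b) := rfl

theorem pvInner_eq (s : List Char) (b : Nat) : pvInner s b = pvInnerL s pvKeywords b := rfl

theorem pvInnerL_le (s : List Char) (L : List (List Char × Nat)) :
    ∀ b : Nat, pvInnerL s L b ≤ b := by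
  induction L with
  | nil => intro b; exact le_refl b
  | cons kr L ih =>
    intro b
    rw [pvInnerL_cons]
    by_cases hc : (decide (kr.2 < b) && PySem.Chars.startswith s kr.1) = true
    · rw [if_pos hc]
      have hlt : kr.2 < b := by
        have := (Bool.and_eq_true _ _).mp hc
        exact of_decide_eq_true this.1
      exact le_trans (ih _) (le_of_lt hlt)
    · rw [if_neg hc]; exact ih b

theorem pvInnerL_le_of_match (s : List Char) (kr : List Char × Nat)
    (hsw : PySem.Chars.startswith s kr.1 = true) (L : List (List Char × Nat)) :
    ∀ b : Nat, kr ∈ L → pvInnerL s L b ≤ kr.2 := by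
  induction L with
  | nil => intro b h; cases h
  | cons hd L ih =>
    intro b hmem
    rw [pvInnerL_cons]
    rcases List.mem_cons.mp hmem with h | h
    · subst h
      by_cases hlt : kr.2 < b
      · rw [if_pos (by simp [hlt, hsw])]
        exact pvInnerL_le s L kr.2
      · rw [if_neg (by simp [hlt])]
        exact le_trans (pvInnerL_le s L b) (Nat.not_lt.mp hlt)
    · by_cases hc : (decide (hd.2 < b) && PySem.Chars.startswith s hd.1) = true
      · rw [if_pos hc]; exact ih _ h
      · rw [if_neg hc]; exact ih _ h

theorem pvInnerL_achieved (s : List Char) (L : List (List Char × Nat)) :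
    ∀ b : Nat, pvInnerL s L b = b ∨
      ∃ kr ∈ L, kr.2 = pvInnerL s L b ∧ PySem.Chars.startswith s kr.1 = true := by
  induction L with
  | nil => intro b; left; rfl
  | cons hd L ih =>
    intro b
    rw [pvInnerL_cons]
    by_cases hc : (decide (hd.2 < b) && PySem.Chars.startswith s hd.1) = true
    · rw [if_pos hc]
      rcases ih hd.2 with h | ⟨kr, hk, he, hsw⟩
      · right; exact ⟨hd, List.mem_cons_self, h.symm, ((Bool.and_eq_true _ _).mp hc).2⟩
      · right; exact ⟨kr, List.mem_cons_of_mem _ hk, he, hsw⟩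
    · rw [if_neg hc]
      rcases ih b with h | ⟨kr, hk, he, hsw⟩
      · left; exact h
      · right; exact ⟨kr, List.mem_cons_of_mem _ hk, he, hsw⟩

-- outer fold over a list of positions
def pvOuter (q : List Char) (l : List Nat) (b : Nat) : Nat :=
  l.foldl (fun b i => pvInner (q.drop i) b) b

theorem pvOuter_cons (q : List Char) (j : Nat) (l : List Nat) (b : Nat) :
    pvOuter q (j :: l) b = pvOuter q l (pvInner (q.drop j) b) := by
  simp only [pvOuter, List.foldl_cons]

theorem pvOuter_le (q : List Char) (l : List Nat) : ∀ b : Nat, pvOuter q l b ≤ b := by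
  induction l with
  | nil => intro b; exact le_refl b
  | cons j l ih =>
    intro b
    rw [pvOuter_cons]
    exact le_trans (ih _) (by rw [pvInner_eq]; exact pvInnerL_le _ _ _)

theorem pvOuter_le_of_match (q : List Char) (i : Nat) (kr : List Char × Nat)
    (hmem : kr ∈ pvKeywords) (hsw : PySem.Chars.startswith (q.drop i) kr.1 = true)
    (l : List Nat) : ∀ b : Nat, i ∈ l → pvOuter q l b ≤ kr.2 := by
  induction l with
  | nil => intro b h; cases h
  | cons j l ih =>
    intro b hi
    rw [pvOuter_cons]
    rcases List.mem_cons.mp hi with h | h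
    · subst h
      exact le_trans (pvOuter_le q l _)
        (by rw [pvInner_eq]; exact pvInnerL_le_of_match _ kr hsw _ _ hmem)
    · exact ih _ h

theorem pvOuter_achieved (q : List Char) (l : List Nat) :
    ∀ b : Nat, pvOuter q l b = b ∨
      ∃ i ∈ l, ∃ kr ∈ pvKeywords, kr.2 = pvOuter q l b ∧
        PySem.Chars.startswith (q.drop i) kr.1 = true := by
  induction l with
  | nil => intro b; left; rfl
  | cons j l ih =>
    intro b
    rw [pvOuter_cons]
    rcases ih (pvInner (q.drop j) b) with h | ⟨i, hi, kr, hk, he, hsw⟩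
    · rw [h, pvInner_eq]
      rcases pvInnerL_achieved (q.drop j) pvKeywords b with h2 | ⟨kr, hk, he, hsw⟩
      · left; exact h2
      · right; exact ⟨j, List.mem_cons_self, kr, hk, he, hsw⟩
    · right; exact ⟨i, List.mem_cons_of_mem _ hi, kr, hk, he, hsw⟩

-- a nonempty keyword is 'in' q iff it starts at some position i < q.length
theorem pv_isIn_iff (q kw : List Char) (hkw : kw ≠ []) :
    PySem.Chars.isIn kw q = true ↔ ∃ i < q.length, kw <+: q.drop i := by
  rw [← PySem.Chars.exists_prefix_drop_iff_isIn kw q]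
  constructor
  · rintro ⟨j, hj⟩
    by_cases h : j < q.length
    · exact ⟨j, h, hj⟩
    · exfalso
      have hd : q.drop j = [] := List.drop_eq_nil_of_le (Nat.not_lt.mp h)
      rw [hd] at hj
      exact hkw (List.prefix_nil.mp hj)
  · rintro ⟨i, _, hp⟩; exact ⟨i, hp⟩

theorem pv_best_le (q : List Char) (kw : List Char) (r : Nat)
    (hmem : (kw, r) ∈ pvKeywords) (hin : PySem.Chars.isIn kw q = true) :
    pvOuter q (List.range q.length) 5 ≤ r := by
  have hne : kw ≠ [] := by
    simp only [pvKeywords, List.mem_cons, List.not_mem_nil, or_false, Prod.mk.injEq] at hmem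
    rcases hmem with ⟨rfl, -⟩ | ⟨rfl, -⟩ | ⟨rfl, -⟩ | ⟨rfl, -⟩ | ⟨rfl, -⟩ | ⟨rfl, -⟩ | ⟨rfl, -⟩ | ⟨rfl, -⟩ | ⟨rfl, -⟩ <;> decide
  obtain ⟨i, hi, hp⟩ := (pv_isIn_iff q kw hne).mp hin
  exact pvOuter_le_of_match q i (kw, r) hmem ((PySem.Chars.startswith_iff _ _).mpr hp) _ 5
    (List.mem_range.mpr hi)

theorem pv_best_achieved (q : List Char) :
    pvOuter q (List.range q.length) 5 = 5 ∨
      ∃ kr ∈ pvKeywords, kr.2 = pvOuter q (List.range q.length) 5 ∧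
        PySem.Chars.isIn kr.1 q = true := by
  rcases pvOuter_achieved q (List.range q.length) 5 with h | ⟨i, _, kr, hk, he, hsw⟩
  · left; exact h
  · right
    exact ⟨kr, hk, he,
      (PySem.Chars.exists_prefix_drop_iff_isIn _ _).mp ⟨i, (PySem.Chars.startswith_iff _ _).mp hsw⟩⟩

-- the sweep computes exactly the rank A's elif chain selects
theorem pv_best_char (q : List Char) :
    pvOuter q (List.range q.length) 5 =
      if PySem.Chars.isIn "derivative".toList q || PySem.Chars.isIn "differentiat".toList q then 0
      else if PySem.Chars.isIn "integral".toList q || PySem.Chars.isIn "integrat".toList q then 1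
      else if PySem.Chars.isIn "sin".toList q || (PySem.Chars.isIn "cos".toList q || PySem.Chars.isIn "tan".toList q) then 2
      else if PySem.Chars.isIn "equation".toList q then 3
      else if PySem.Chars.isIn "graph".toList q then 4
      else 5 := by
  have hach := pv_best_achieved q
  have hub : ∀ kw r, (kw, r) ∈ pvKeywords → PySem.Chars.isIn kw q = true →
      pvOuter q (List.range q.length) 5 ≤ r := fun kw r h1 h2 => pv_best_le q kw r h1 h2
  split_ifs with h1 h2 h3 h4 h5
  · rcases (Bool.or_eq_true _ _).mp h1 with h | h
    · exact Nat.le_zero.mp (hub _ 0 (by simp [pvKeywords]) h)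
    · exact Nat.le_zero.mp (hub _ 0 (by simp [pvKeywords]) h)
  · simp only [Bool.or_eq_true, not_or, Bool.not_eq_true] at h1
    have hle : pvOuter q (List.range q.length) 5 ≤ 1 := by
      rcases (Bool.or_eq_true _ _).mp h2 with h | h
      · exact hub _ 1 (by simp [pvKeywords]) h
      · exact hub _ 1 (by simp [pvKeywords]) h
    rcases hach with h | ⟨kr, hk, he, hin⟩
    · omega
    · simp only [pvKeywords, List.mem_cons, List.not_mem_nil, or_false] at hk
      rcases hk with rfl | rfl | rfl | rfl | rfl | rfl | rfl | rfl | rfl <;>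
        simp_all <;> omega
  · simp only [Bool.or_eq_true, not_or, Bool.not_eq_true] at h1 h2
    have hle : pvOuter q (List.range q.length) 5 ≤ 2 := by
      rcases (Bool.or_eq_true _ _).mp h3 with h | h
      · exact hub _ 2 (by simp [pvKeywords]) h
      · rcases (Bool.or_eq_true _ _).mp h with h | h
        · exact hub _ 2 (by simp [pvKeywords]) h
        · exact hub _ 2 (by simp [pvKeywords]) h
    rcases hach with h | ⟨kr, hk, he, hin⟩
    · omega
    · simp only [pvKeywords, List.mem_cons, List.not_mem_nil, or_false] at hk
      rcases hk with rfl | rfl | rfl | rfl | rfl | rfl | rfl | rfl | rfl <;>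
        simp_all <;> omega
  · simp only [Bool.or_eq_true, not_or, Bool.not_eq_true] at h1 h2 h3
    have hle : pvOuter q (List.range q.length) 5 ≤ 3 := hub _ 3 (by simp [pvKeywords]) h4
    rcases hach with h | ⟨kr, hk, he, hin⟩
    · omega
    · simp only [pvKeywords, List.mem_cons, List.not_mem_nil, or_false] at hk
      rcases hk with rfl | rfl | rfl | rfl | rfl | rfl | rfl | rfl | rfl <;>
        simp_all <;> omega
  · simp only [Bool.or_eq_true, not_or, Bool.not_eq_true] at h1 h2 h3 h4
    have hle : pvOuter q (List.range q.length) 5 ≤ 4 := hub _ 4 (by simp [pvKeywords]) h5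
    rcases hach with h | ⟨kr, hk, he, hin⟩
    · omega
    · simp only [pvKeywords, List.mem_cons, List.not_mem_nil, or_false] at hk
      rcases hk with rfl | rfl | rfl | rfl | rfl | rfl | rfl | rfl | rfl <;>
        simp_all
  · simp only [Bool.or_eq_true, not_or, Bool.not_eq_true] at h1 h2 h3 h4 h5
    rcases hach with h | ⟨kr, hk, he, hin⟩
    · exact h
    · simp only [pvKeywords, List.mem_cons, List.not_mem_nil, or_false] at hk
      rcases hk with rfl | rfl | rfl | rfl | rfl | rfl | rfl | rfl | rfl <;> simp_all

-- ===== VERDICT (by name: the statement is the Claim_ definition above) =====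
theorem extract_topic_from_question_py_spec : Claim_equal_extract_topic_from_question_py := by
  intro question _
  unfold Spec_extract_topic_from_question_py extract_topic_from_question_py extract_topic_from_question_py_alt
  have hbc := pv_best_char ((PySem.Str.lower question).toList)
  unfold pvOuter at hbc
  simp only [show pvTopics.length = 5 from rfl]
  rw [hbc]
  simp only [PySem.Str.isIn_eq, List.any_cons, List.any_nil, Bool.or_false]
  split_ifs <;> simp_all [pvTopics]
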